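-- pv_equiv track=rewrite | github.com/ldnam806/Problems-vs.-Algorithms | problem_3.py | rearrange_digits_max_sum
-- ===== SOURCE A (Python) =====
-- def rearrange_digits_max_sum(input_list):
--     if len(input_list) <= 1:
--         return input_list
--
--     # Function to find the maximum and minimum elements in the array
--     def find_max_min(arr):
--         max_num, min_num = float('-inf'), float('inf')
--         for num in arr:
--             if num > max_num:
--                 max_num = num
--             if num < min_num:
--                 min_num = num
--         return max_num, min_num
--
--     max_num, min_num = find_max_min(input_list)
--
--     # Initialize frequency counters for each digit
--     frequency = [0] * 10
--     for num in input_list: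
--         frequency[num] += 1
--
--     # Construct the two numbers based on their frequencies
--     num1, num2 = 0, 0
--     is_first_num = True
--     for digit in range(9, -1, -1):
--         while frequency[digit] > 0:
--             if is_first_num:
--                 num1 = num1 * 10 + digit
--             else:
--                 num2 = num2 * 10 + digit
--             frequency[digit] -= 1
--             is_first_num = not is_first_num
--
--     return [num1, num2]
-- ===== SOURCE B (Python) =====
-- def rearrange_digits_max_sum(input_list):
--     if len(input_list) <= 1:
--         return input_list
--     num1, num2 = 0, 0
--     for i, d in enumerate(sorted(input_list, reverse=True)):
--         if i % 2 == 0: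
--             num1 = num1 * 10 + d
--         else:
--             num2 = num2 * 10 + d
--     return [num1, num2]
-- ===== Notes on version B (the rewrite author's own statement) =====
-- stated objective: simpler
-- what changed: Replaced the counting-sort (size-10 frequency table with nested 9..0/while loops) and the unused find_max_min helper by a comparison sort descending plus one flat enumerate pass that alternates digits between the two numbers by index parity.
-- intended difference: On lists of length >= 2 containing a negative element (inside Pre_ necessarily between -10 and -1), A's frequency[num] negative-index wraparound silently counts -k as the digit 10-k, while B sorts the actual values and keeps them; B's value is intended because -k is not the digit 10-k. — e.g. on rearrange_digits_max_sum([-1, 5]): A returns [9, 5], B returns [5, -1]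
import Mathlib
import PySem

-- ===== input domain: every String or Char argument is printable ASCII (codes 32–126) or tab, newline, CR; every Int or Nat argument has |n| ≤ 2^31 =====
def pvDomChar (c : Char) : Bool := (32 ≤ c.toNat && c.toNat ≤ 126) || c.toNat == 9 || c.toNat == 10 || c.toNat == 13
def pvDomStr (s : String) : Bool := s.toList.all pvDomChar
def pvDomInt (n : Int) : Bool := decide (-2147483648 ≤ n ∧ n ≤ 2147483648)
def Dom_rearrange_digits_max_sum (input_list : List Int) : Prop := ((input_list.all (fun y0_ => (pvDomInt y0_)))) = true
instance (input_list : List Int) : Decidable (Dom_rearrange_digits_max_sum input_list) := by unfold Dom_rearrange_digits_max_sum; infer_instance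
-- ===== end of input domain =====

-- B replaces A's counting sort (frequency table + nested 9..0/while loops) and unused
-- find_max_min helper by a descending comparison sort and one flat enumerate pass (simpler).

-- ===== PORT A =====
-- find_max_min: max_num/min_num start at float('-inf')/float('inf'); `none` stands for the
-- infinities (the result is computed and discarded by A, exactly as in the Python).
def pvFindMaxMin (arr : List Int) : Option Int × Option Int :=
  arr.foldl (fun st num =>
    (match st.1 with | none => some num | some m => if num > m then some num else some m,
     match st.2 with | none => some num | some m => if num < m then some num else some m))
    (none, none)

-- one step of the while-loop body: append `digit` to num1 or num2 and toggle is_first_num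
def pvStepA (st : Int × Int × Bool) (digit : Int) : Int × Int × Bool :=
  if st.2.2 then (st.1 * 10 + digit, st.2.1, false) else (st.1, st.2.1 * 10 + digit, true)

-- `while frequency[digit] > 0: …; frequency[digit] -= 1` — the counter frequency[digit]
-- decreases by exactly 1 each iteration, so the while-loop is recursion on its (toNat) value
def pvWhileA (digit : Int) : Nat → (Int × Int × Bool) → Int × Int × Bool
  | 0, st => st
  | n + 1, st => pvWhileA digit n (pvStepA st digit)

def rearrange_digits_max_sum (input_list : List Int) : List Int :=
  if input_list.length ≤ 1 then input_list
  else
    let _fm := pvFindMaxMin input_list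
    let frequency :=
      input_list.foldl
        (fun freq num => PySem.List.pySetD freq num (PySem.List.pyGetD freq num 0 + 1))
        (PySem.List.pyRepeat [(0 : Int)] 10)
    let st :=
      (PySem.List.pyRange 9 (-1) (-1)).foldl
        (fun st digit => pvWhileA digit (PySem.List.pyGetD frequency digit 0).toNat st)
        (0, 0, true)
    [st.1, st.2.1]

-- ===== PORT B =====
def pvStepB (p : Int × Int) (e : Int × Int) : Int × Int :=
  if PySem.Int.mod e.1 2 = 0 then (p.1 * 10 + e.2, p.2) else (p.1, p.2 * 10 + e.2)

def rearrange_digits_max_sum_alt (input_list : List Int) : List Int :=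
  if input_list.length ≤ 1 then input_list
  else
    let st :=
      (PySem.List.enumerate (PySem.List.sorted input_list (fun x => x) true) 0).foldl
        pvStepB (0, 0)
    [st.1, st.2]

-- ===== PRECONDITION & SPEC =====
-- Pre_ excludes lists of length ≥ 2 with an element outside the range -10 to 9: there
-- `frequency[num] += 1` raises IndexError and A returns nothing.
def Pre_rearrange_digits_max_sum (input_list : List Int) : Prop :=
  input_list.length ≤ 1 ∨ ∀ x ∈ input_list, -10 ≤ x ∧ x ≤ 9
instance (input_list : List Int) : Decidable (Pre_rearrange_digits_max_sum input_list) := by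
  unfold Pre_rearrange_digits_max_sum; infer_instance
def pvWitness_rearrange_digits_max_sum : List Int := [4, 5, 9, 2, 1]

-- On lists of length ≥ 2 containing a negative element (inside Pre_ necessarily between -10 and -1),
-- A's frequency[num] negative-index wraparound silently counts -k as the digit 10-k;
-- B sorts the actual values and keeps them, the intended value, because -k is not
-- the digit 10-k.
def D_rearrange_digits_max_sum (input_list : List Int) : Prop :=
  2 ≤ input_list.length ∧ ∃ x ∈ input_list, x < 0
instance (input_list : List Int) : Decidable (D_rearrange_digits_max_sum input_list) := by
  unfold D_rearrange_digits_max_sum; infer_instance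

def Spec_rearrange_digits_max_sum (input_list : List Int) (out : List Int) : Prop :=
  ¬ D_rearrange_digits_max_sum input_list → out = rearrange_digits_max_sum_alt input_list
instance (input_list : List Int) (out : List Int) : Decidable (Spec_rearrange_digits_max_sum input_list out) := by
  unfold Spec_rearrange_digits_max_sum; infer_instance

def pvDiffWitness_rearrange_digits_max_sum : List Int := [-1, 5]
def pvDiffWitnessOut_rearrange_digits_max_sum : (List Int) × (List Int) := ([9, 5], [5, -1])

-- ===== CLAIM (what is proved, stated in full; the proofs are below) =====
def Claim_unchanged_rearrange_digits_max_sum : Prop :=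
  ∀ (input_list : List Int), Dom_rearrange_digits_max_sum input_list →
    Pre_rearrange_digits_max_sum input_list →
    Spec_rearrange_digits_max_sum input_list (rearrange_digits_max_sum input_list)
def Claim_changed_rearrange_digits_max_sum : Prop :=
  Dom_rearrange_digits_max_sum (pvDiffWitness_rearrange_digits_max_sum) ∧
  Pre_rearrange_digits_max_sum (pvDiffWitness_rearrange_digits_max_sum) ∧
  D_rearrange_digits_max_sum (pvDiffWitness_rearrange_digits_max_sum) ∧
  rearrange_digits_max_sum (pvDiffWitness_rearrange_digits_max_sum) = pvDiffWitnessOut_rearrange_digits_max_sum.1 ∧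
  rearrange_digits_max_sum_alt (pvDiffWitness_rearrange_digits_max_sum) = pvDiffWitnessOut_rearrange_digits_max_sum.2 ∧
  pvDiffWitnessOut_rearrange_digits_max_sum.1 ≠ pvDiffWitnessOut_rearrange_digits_max_sum.2

-- ===== LEMMAS AND PROOFS =====

-- A's while-loop run n times is a fold over n copies of the digit
theorem whileA_eq_foldl (d : Int) (n : Nat) (st : Int × Int × Bool) :
    pvWhileA d n st = (List.replicate n d).foldl pvStepA st := by
  induction n generalizing st with
  | zero => rfl
  | succ k ih => simp [pvWhileA, List.replicate_succ, ih]

-- A's frequency table holds the count of each digit 0..9 (all elements of l in 0..9)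
theorem freq_getD (l : List Int) (f : List Int) (hf : f.length = 10)
    (h : ∀ x ∈ l, 0 ≤ x ∧ x ≤ 9) (d : Int) (hd0 : 0 ≤ d) (hd9 : d ≤ 9) :
    PySem.List.pyGetD
      (l.foldl (fun freq num => PySem.List.pySetD freq num (PySem.List.pyGetD freq num 0 + 1)) f)
      d 0 = PySem.List.pyGetD f d 0 + l.count d := by
  induction l generalizing f with
  | nil => simp
  | cons num tl ih =>
    obtain ⟨h0, h9⟩ := h num (by simp)
    have hrest := fun x hx => h x (List.mem_cons_of_mem _ hx)
    simp only [List.foldl_cons]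
    rw [ih _ (by rw [PySem.List.length_pySetD]; exact hf) hrest]
    have hnum : num = ((num.toNat : Nat) : Int) := by omega
    have hd : d = ((d.toNat : Nat) : Int) := by omega
    rw [hnum, hd, PySem.List.pyGetD_pySetD_natCast _ _ _ _ _ (by omega)]
    rw [List.count_cons]
    by_cases he : d.toNat = num.toNat
    · have : num = d := by omega
      simp [he, this]
      omega
    · simp [he]
      omega

-- B's enumerate fold with start k equals the toggle-state fold with parity k % 2
theorem bfold (ys : List Int) (k : Nat) (n1 n2 : Int) :
    (PySem.List.enumerate ys (k : Int)).foldl pvStepB (n1, n2) =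
      ((ys.foldl pvStepA (n1, n2, k % 2 == 0)).1, (ys.foldl pvStepA (n1, n2, k % 2 == 0)).2.1) := by
  induction ys generalizing k n1 n2 with
  | nil => rfl
  | cons y tl ih =>
    rw [PySem.List.enumerate_cons]
    simp only [List.foldl_cons]
    have hcast : (k : Int) + 1 = ((k + 1 : Nat) : Int) := by push_cast; ring
    have hm : PySem.Int.mod ((k : Nat) : Int) 2 = ((k % 2 : Nat) : Int) := by
      exact_mod_cast PySem.Int.mod_natCast k 2
    by_cases hk : k % 2 = 0
    · have hb : pvStepB (n1, n2) ((k : Int), y) = (n1 * 10 + y, n2) := by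
        rw [pvStepB]
        simp only [hm, hk]
        norm_num
      have ha : pvStepA (n1, n2, k % 2 == 0) y = (n1 * 10 + y, n2, false) := by
        have hb' : (k % 2 == 0) = true := by simp only [beq_iff_eq]; omega
        simp [pvStepA, hb']
      rw [hb, ha, hcast, ih]
      have hnext : ((k + 1) % 2 == 0) = false := by
        simp only [beq_eq_false_iff_ne]; omega
      rw [hnext]
    · have hb : pvStepB (n1, n2) ((k : Int), y) = (n1, n2 * 10 + y) := by
        have hne : ¬ (((k % 2 : Nat) : Int) = 0) := by
          simp only [Int.natCast_eq_zero]; omega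
        rw [pvStepB]
        simp only [hm, if_neg hne]
      have ha : pvStepA (n1, n2, k % 2 == 0) y = (n1, n2 * 10 + y, true) := by
        have hb' : (k % 2 == 0) = false := by simp only [beq_eq_false_iff_ne]; omega
        simp [pvStepA, hb']
      rw [hb, ha, hcast, ih]
      have hnext : ((k + 1) % 2 == 0) = true := by
        simp only [beq_iff_eq]; omega
      rw [hnext]

-- descending sorted characterisation allowing duplicates (PySem only ships the strict-gt form)
theorem sorted_rev_eq_of_perm_of_pairwise_ge (xs ys : List Int)
    (hp : ys.Perm xs) (hs : ys.Pairwise (fun a b => b ≤ a)) :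
    PySem.List.sorted xs (fun x => x) true = ys := by
  have h1 : (PySem.List.sorted xs (fun x => x) true).Perm ys :=
    (PySem.List.sorted_perm xs _ true).trans hp.symm
  have h2 := PySem.List.sorted_pairwise_rev xs (fun x => x)
  exact h1.eq_of_pairwise (le := fun a b : Int => b ≤ a)
    (fun a b _ _ hab hba => le_antisymm hba hab) h2 hs

-- the digit stream A emits: each digit 9,8,…,0 repeated its multiplicity in l
def pvE (l : List Int) : List Int :=
  (PySem.List.pyRange 9 (-1) (-1)).flatMap (fun d => List.replicate (l.count d) d)

theorem range_lit : PySem.List.pyRange 9 (-1) (-1) = [9,8,7,6,5,4,3,2,1,0] := by decide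

theorem pvE_perm (l : List Int) (h : ∀ x ∈ l, 0 ≤ x ∧ x ≤ 9) : (pvE l).Perm l := by
  rw [List.perm_iff_count]
  intro a
  by_cases ha : 0 ≤ a ∧ a ≤ 9
  · obtain ⟨h1, h2⟩ := ha
    interval_cases a <;>
      simp [pvE, range_lit, List.count_append, List.count_replicate]
  · have hnm : a ∉ l := fun hm => ha ⟨(h a hm).1, (h a hm).2⟩
    rw [List.count_eq_zero_of_not_mem hnm]
    simp only [pvE, range_lit, List.flatMap_cons, List.flatMap_nil, List.append_nil,
      List.count_append, List.count_replicate]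
    have h9 : ¬ ((9:Int) == a) = true := by simp; omega
    have h8 : ¬ ((8:Int) == a) = true := by simp; omega
    have h7 : ¬ ((7:Int) == a) = true := by simp; omega
    have h6 : ¬ ((6:Int) == a) = true := by simp; omega
    have h5 : ¬ ((5:Int) == a) = true := by simp; omega
    have h4 : ¬ ((4:Int) == a) = true := by simp; omega
    have h3 : ¬ ((3:Int) == a) = true := by simp; omega
    have h2 : ¬ ((2:Int) == a) = true := by simp; omega
    have h1 : ¬ ((1:Int) == a) = true := by simp; omega
    have h0 : ¬ ((0:Int) == a) = true := by simp; omega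
    simp [h9, h8, h7, h6, h5, h4, h3, h2, h1, h0]

theorem pairwise_rep_blocks (ds : List Int) (c : Int → Nat) (hds : ds.Pairwise (· > ·)) :
    (ds.flatMap (fun d => List.replicate (c d) d)).Pairwise (fun a b => b ≤ a) := by
  induction ds with
  | nil => simp
  | cons d tl ih =>
    simp only [List.flatMap_cons]
    rw [List.pairwise_append]
    refine ⟨List.pairwise_replicate.mpr (Or.inr le_rfl), ih (List.pairwise_cons.mp hds).2, ?_⟩
    intro a ha b hb
    have ha' := List.eq_of_mem_replicate ha
    obtain ⟨d', hd', hbd⟩ := List.mem_flatMap.mp hb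
    have hb' := List.eq_of_mem_replicate hbd
    have hlt : d > d' := (List.pairwise_cons.mp hds).1 d' hd'
    subst ha' hb'
    omega

theorem pvE_pairwise (l : List Int) : (pvE l).Pairwise (fun a b => b ≤ a) :=
  pairwise_rep_blocks _ _ (by rw [range_lit]; decide)

theorem main_eq (l : List Int) (hlen : ¬ l.length ≤ 1) (h : ∀ x ∈ l, 0 ≤ x ∧ x ≤ 9) :
    rearrange_digits_max_sum l = rearrange_digits_max_sum_alt l := by
  rw [rearrange_digits_max_sum, rearrange_digits_max_sum_alt, if_neg hlen, if_neg hlen]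
  have hsorted : PySem.List.sorted l (fun x => x) true = pvE l :=
    sorted_rev_eq_of_perm_of_pairwise_ge l (pvE l) (pvE_perm l h) (pvE_pairwise l)
  have hA :
      (PySem.List.pyRange 9 (-1) (-1)).foldl
        (fun st digit =>
          pvWhileA digit
            (PySem.List.pyGetD
              (l.foldl (fun freq num => PySem.List.pySetD freq num (PySem.List.pyGetD freq num 0 + 1))
                (PySem.List.pyRepeat [(0 : Int)] 10))
              digit 0).toNat st)
        (0, 0, true) = (pvE l).foldl pvStepA (0, 0, true) := by
    rw [PySem.List.foldl_congr_mem _ _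
      (fun st digit => (List.replicate (l.count digit) digit).foldl pvStepA st) _ ?_]
    · rw [pvE, List.foldl_flatMap]
    · intro acc digit hdig
      have hdr : 0 ≤ digit ∧ digit ≤ 9 := by
        rw [range_lit] at hdig
        fin_cases hdig <;> omega
      have hcnt := freq_getD l (PySem.List.pyRepeat [(0 : Int)] 10)
        (by rw [PySem.List.pyRepeat_singleton]; decide) h digit hdr.1 hdr.2
      have hzero : PySem.List.pyGetD (PySem.List.pyRepeat [(0 : Int)] 10) digit 0 = 0 := by
        obtain ⟨hd0, hd9⟩ := hdr
        interval_cases digit <;> decide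
      rw [whileA_eq_foldl, hcnt, hzero]
      simp
  simp only [hA, hsorted]
  have hb := bfold (pvE l) 0 0 0
  simp only [Nat.cast_zero] at hb
  rw [hb]
  simp

-- ===== VERDICT (by name: the statement is the Claim_ definition above) =====
theorem rearrange_digits_max_sum_spec : Claim_unchanged_rearrange_digits_max_sum := by
  intro l _hdom hpre hnd
  by_cases hlen : l.length ≤ 1
  · rw [rearrange_digits_max_sum, rearrange_digits_max_sum_alt, if_pos hlen, if_pos hlen]
  · have hall : ∀ x ∈ l, 0 ≤ x ∧ x ≤ 9 := by
      rcases hpre with hp | hp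
      · exact absurd hp hlen
      · intro x hx
        have h1 := hp x hx
        have hx0 : ¬ x < 0 := fun hneg => hnd ⟨by omega, x, hx, hneg⟩
        omega
    exact main_eq l hlen hall

theorem rearrange_digits_max_sum_changed : Claim_changed_rearrange_digits_max_sum := by
  unfold Claim_changed_rearrange_digits_max_sum; decide
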